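-- pv_equiv track=rewrite | github.com/masonlonoff/alignment-aware-tokenization | tokenizers/bpe_search.py | benign_counts_by_stem
-- ===== SOURCE A (Python) =====
-- from typing import Dict, List, Tuple
--
-- def benign_counts_by_stem(neutrals: List[str], stems: List[str], max_hits_per_stem: int = 200) -> Dict[str, int]:
--     """
--     Count how often each hazard stem appears as a substring inside neutral texts.
--
--     Args:
--         neutrals: Neutral look-alike sentences.
--         stems:    Hazard stems to test.
--         max_hits_per_stem: Early-stop threshold per stem for speed.
--
--     Returns:
--         Dict stem -> count (number of neutral sentences containing the stem).
--     """
--     counts = {s: 0 for s in stems}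
--     for s in stems:
--         s_low = s.lower()
--         hits = 0
--         for text in neutrals:
--             if s_low in text.lower():
--                 hits += 1
--                 if hits >= max_hits_per_stem:
--                     break
--         counts[s] = hits
--     return counts
-- ===== SOURCE B (Python) =====
-- def benign_counts_by_stem(neutrals, stems, max_hits_per_stem=200):
--     # Index each sentence once: the set of all its lowercase windows whose length
--     # is some stem's length; a stem occurs in a sentence iff its lowercase form
--     # is in that sentence's window set, so each query is one set lookup.
--     lengths = sorted({len(s) for s in stems})
--     window_sets = []
--     for text in neutrals:
--         t = text.lower()
--         window_sets.append({t[i:i + L] for L in lengths for i in range(len(t) - L + 1)})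
--     return {s: max(0, min(sum(s.lower() in ws for ws in window_sets), max_hits_per_stem))
--             for s in dict.fromkeys(stems)}
-- ===== Notes on version B (the rewrite author's own statement) =====
-- stated objective: alternative
-- what changed: B replaces A's per-stem substring scan over every sentence with a windowing index: each sentence is lowercased once and expanded into the set of its windows at the distinct stem lengths, so each stem's count is a set-membership count clamped into [0, max_hits_per_stem].
-- intended difference: When max_hits_per_stem <= 0 and some stem occurs in some neutral sentence, A still reports 1 for each occurring stem (it increments before testing the cap), while B reports 0, the intended meaning of a non-positive cap. — e.g. on benign_counts_by_stem(["cat"], ["cat"], 0): A returns [("cat", 1)], B returns [("cat", 0)]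
import Mathlib
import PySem

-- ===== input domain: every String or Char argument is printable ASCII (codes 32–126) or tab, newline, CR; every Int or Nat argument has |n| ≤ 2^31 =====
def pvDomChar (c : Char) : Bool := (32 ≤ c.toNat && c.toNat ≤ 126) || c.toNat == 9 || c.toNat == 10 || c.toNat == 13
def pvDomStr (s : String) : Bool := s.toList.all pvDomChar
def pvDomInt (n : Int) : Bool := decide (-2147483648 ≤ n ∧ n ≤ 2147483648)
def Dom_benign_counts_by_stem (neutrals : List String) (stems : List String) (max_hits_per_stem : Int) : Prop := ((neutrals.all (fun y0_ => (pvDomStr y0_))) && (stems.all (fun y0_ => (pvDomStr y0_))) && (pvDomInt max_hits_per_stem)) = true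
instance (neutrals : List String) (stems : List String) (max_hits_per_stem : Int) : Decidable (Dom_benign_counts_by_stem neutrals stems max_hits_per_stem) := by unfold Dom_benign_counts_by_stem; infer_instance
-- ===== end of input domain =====

-- B indexes each lowercased sentence once into the set of its windows at the distinct stem
-- lengths and answers each stem by set lookups clamped into [0, cap] — a different algorithm
-- (windowing hash index vs per-stem substring scans), same value except the non-positive-cap
-- corner stated in D_ below.

-- ===== PORT A =====
-- inner loop of A over `neutrals` with the `break` at hits >= max_hits_per_stem
def pvAHits (s_low : String) (mx : Int) : List String → Int → Int
  | [], hits => hits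
  | text :: ts, hits =>
    if PySem.Str.isIn s_low (PySem.Str.lower text) then
      if hits + 1 ≥ mx then hits + 1
      else pvAHits s_low mx ts (hits + 1)
    else pvAHits s_low mx ts hits

def benign_counts_by_stem (neutrals : List String) (stems : List String) (max_hits_per_stem : Int) : List (String × Int) :=
  let counts : PySem.Dict String Int := stems.foldl (fun d s => d.insert s 0) PySem.Dict.empty
  let counts := stems.foldl (fun d s =>
      let s_low := PySem.Str.lower s
      let hits := pvAHits s_low max_hits_per_stem neutrals 0
      d.insert s hits) counts
  counts.items

-- ===== PORT B =====
-- the set comprehension {t[i:i+L] for L in lengths for i in range(len(t)-L+1)}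
def pvWindowSet (t : List Char) (lengths : List Int) : PySem.Set String :=
  lengths.foldl (fun ws L =>
    (PySem.List.pyRange 0 ((t.length : Int) - L + 1)).foldl
      (fun ws i => PySem.Set.add ws (String.ofList (PySem.List.slice t (some i) (some (i + L))))) ws)
    PySem.Set.empty

def benign_counts_by_stem_alt (neutrals : List String) (stems : List String) (max_hits_per_stem : Int) : List (String × Int) :=
  let lengths := PySem.List.sorted (PySem.Set.ofList (stems.map PySem.Str.len)) (fun x => x) false
  let window_sets := neutrals.map (fun text => pvWindowSet (PySem.Chars.lower text.toList) lengths)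
  (PySem.List.dedup stems).map (fun s =>
    (s, max 0 (min ((window_sets.countP
          (fun ws => PySem.Set.contains ws (String.ofList (PySem.Chars.lower s.toList))) : Nat) : Int)
        max_hits_per_stem)))

-- ===== PRECONDITION & SPEC =====
-- When max_hits_per_stem <= 0 and some stem occurs in some neutral sentence, A still reports 1
-- for each occurring stem (it increments before testing the cap), while B reports 0, the
-- intended meaning of a non-positive cap.
def D_benign_counts_by_stem (neutrals : List String) (stems : List String) (max_hits_per_stem : Int) : Prop :=
  max_hits_per_stem ≤ 0 ∧
    ∃ s ∈ stems, ∃ t ∈ neutrals, PySem.Str.isIn (PySem.Str.lower s) (PySem.Str.lower t) = true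
instance (neutrals : List String) (stems : List String) (max_hits_per_stem : Int) : Decidable (D_benign_counts_by_stem neutrals stems max_hits_per_stem) := by unfold D_benign_counts_by_stem; infer_instance

def Spec_benign_counts_by_stem (neutrals : List String) (stems : List String) (max_hits_per_stem : Int) (out : List (String × Int)) : Prop := ¬ D_benign_counts_by_stem neutrals stems max_hits_per_stem → out = benign_counts_by_stem_alt neutrals stems max_hits_per_stem
instance (neutrals : List String) (stems : List String) (max_hits_per_stem : Int) (out : List (String × Int)) : Decidable (Spec_benign_counts_by_stem neutrals stems max_hits_per_stem out) := by unfold Spec_benign_counts_by_stem; infer_instance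

def pvDiffWitness_benign_counts_by_stem : List String × List String × Int := (["cat"], ["cat"], 0)
def pvDiffWitnessOut_benign_counts_by_stem : (List (String × Int)) × (List (String × Int)) :=
  ([("cat", 1)], [("cat", 0)])

-- ===== CLAIM (what is proved, stated in full; the proofs are below) =====
def Claim_unchanged_benign_counts_by_stem : Prop := ∀ (neutrals : List String) (stems : List String) (max_hits_per_stem : Int), Dom_benign_counts_by_stem neutrals stems max_hits_per_stem → Spec_benign_counts_by_stem neutrals stems max_hits_per_stem (benign_counts_by_stem neutrals stems max_hits_per_stem)
def Claim_changed_benign_counts_by_stem : Prop := Dom_benign_counts_by_stem (pvDiffWitness_benign_counts_by_stem.1) (pvDiffWitness_benign_counts_by_stem.2.1) (pvDiffWitness_benign_counts_by_stem.2.2) ∧ D_benign_counts_by_stem (pvDiffWitness_benign_counts_by_stem.1) (pvDiffWitness_benign_counts_by_stem.2.1) (pvDiffWitness_benign_counts_by_stem.2.2) ∧ benign_counts_by_stem (pvDiffWitness_benign_counts_by_stem.1) (pvDiffWitness_benign_counts_by_stem.2.1) (pvDiffWitness_benign_counts_by_stem.2.2) = pvDiffWitnessOut_benign_counts_by_stem.1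 ∧ benign_counts_by_stem_alt (pvDiffWitness_benign_counts_by_stem.1) (pvDiffWitness_benign_counts_by_stem.2.1) (pvDiffWitness_benign_counts_by_stem.2.2) = pvDiffWitnessOut_benign_counts_by_stem.2 ∧ pvDiffWitnessOut_benign_counts_by_stem.1 ≠ pvDiffWitnessOut_benign_counts_by_stem.2
def Claim_exact_benign_counts_by_stem : Prop := ∀ (neutrals : List String) (stems : List String) (max_hits_per_stem : Int), Dom_benign_counts_by_stem neutrals stems max_hits_per_stem → D_benign_counts_by_stem neutrals stems max_hits_per_stem → benign_counts_by_stem neutrals stems max_hits_per_stem ≠ benign_counts_by_stem_alt neutrals stems max_hits_per_stem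

-- ===== LEMMAS AND PROOFS =====

-- membership in a fold of Set.add over a list
theorem mem_foldl_add {α β : Type} [BEq β] [LawfulBEq β] (f : α → β) (y : β) :
    ∀ (l : List α) (s : PySem.Set β),
      y ∈ l.foldl (fun ws x => PySem.Set.add ws (f x)) s ↔ y ∈ s ∨ ∃ x ∈ l, y = f x := by
  intro l
  induction l with
  | nil => intro s; simp
  | cons x xs ih =>
    intro s
    simp only [List.foldl_cons, ih, PySem.Set.mem_add]
    constructor
    · rintro (⟨h | h⟩ | ⟨z, hz, hy⟩)
      · exact Or.inl h
      · exact Or.inr ⟨x, by simp, h⟩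
      · exact Or.inr ⟨z, by simp [hz], hy⟩
    · rintro (h | ⟨z, hz, hy⟩)
      · exact Or.inl (Or.inl h)
      · rcases List.mem_cons.mp hz with rfl | hz
        · exact Or.inl (Or.inr hy)
        · exact Or.inr ⟨z, hz, hy⟩

-- membership in the window set
theorem mem_windowSet (t : List Char) (y : String) :
    ∀ (lengths : List Int) (s : PySem.Set String),
      y ∈ (lengths.foldl (fun ws L =>
            (PySem.List.pyRange 0 ((t.length : Int) - L + 1)).foldl
              (fun ws i => PySem.Set.add ws (String.ofList (PySem.List.slice t (some i) (some (i + L))))) ws) s)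
        ↔ y ∈ s ∨ ∃ L ∈ lengths, ∃ i ∈ PySem.List.pyRange 0 ((t.length : Int) - L + 1),
            y = String.ofList (PySem.List.slice t (some i) (some (i + L))) := by
  intro lengths
  induction lengths with
  | nil => intro s; simp
  | cons L Ls ih =>
    intro s
    simp only [List.foldl_cons, ih,
      mem_foldl_add (fun i => String.ofList (PySem.List.slice t (some i) (some (i + L)))) y]
    constructor
    · rintro (⟨h | ⟨i, hi, hy⟩⟩ | ⟨M, hM, i, hi, hy⟩)
      · exact Or.inl h
      · exact Or.inr ⟨L, by simp, i, hi, hy⟩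
      · exact Or.inr ⟨M, by simp [hM], i, hi, hy⟩
    · rintro (h | ⟨M, hM, i, hi, hy⟩)
      · exact Or.inl (Or.inl h)
      · rcases List.mem_cons.mp hM with rfl | hM
        · exact Or.inl (Or.inr ⟨i, hi, hy⟩)
        · exact Or.inr ⟨M, hM, i, hi, hy⟩

-- a window-set lookup of a pattern whose length is indexed IS substring containment
theorem contains_windowSet_iff (t p : List Char) (lengths : List Int)
    (hlen : ((p.length : Int)) ∈ lengths) (hpos : ∀ L ∈ lengths, 0 ≤ L) :
    PySem.Set.contains (pvWindowSet t lengths) (String.ofList p) = true ↔ p <:+: t := by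
  rw [PySem.Set.contains_iff]
  unfold pvWindowSet
  rw [mem_windowSet]
  simp only [PySem.Set.empty]
  constructor
  · rintro (h | ⟨L, hL, i, hi, hy⟩)
    · simp at h
    · rcases PySem.List.mem_pyRange_one.mp hi with ⟨hi0, hilt⟩
      have hL0 : 0 ≤ L := hpos L hL
      have hy' : p = PySem.List.slice t (some i) (some (i + L)) := by
        have := congrArg String.toList hy
        simpa [String.toList_ofList] using this
      rw [hy', PySem.List.slice_toNat t hi0 (by omega)]
      exact ((List.take_prefix _ _).isInfix).trans ((List.drop_suffix _ _).isInfix)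
  · intro hinf
    rcases hinf with ⟨u, v, huv⟩
    refine Or.inr ⟨(p.length : Int), hlen, (u.length : Int), ?_, ?_⟩
    · rw [PySem.List.mem_pyRange_one]
      constructor
      · exact Int.natCast_nonneg _
      · have : t.length = u.length + p.length + v.length := by
          rw [← huv]; simp [List.length_append]; omega
        omega
    · have ht : t = u ++ (p ++ v) := by rw [← huv]; simp [List.append_assoc]
      have : PySem.List.slice t (some (u.length : Int)) (some ((u.length : Int) + (p.length : Int)))
          = p := by
        rw [PySem.List.slice_toNat t (Int.natCast_nonneg _) (by positivity)]
        have h1 : ((u.length : Int) + (p.length : Int)).toNat = u.length + p.length := by omega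
        rw [h1, Int.toNat_natCast, ht, List.drop_left]
        simp
      rw [this]

-- every stem's lowered length is indexed
theorem lower_len_mem_lengths (stems : List String) (s : String) (hs : s ∈ stems) :
    (((PySem.Chars.lower s.toList).length : Int))
      ∈ PySem.List.sorted (PySem.Set.ofList (stems.map PySem.Str.len)) (fun x => x) false := by
  rw [PySem.List.mem_sorted, PySem.Set.mem_ofList]
  have : ((PySem.Chars.lower s.toList).length : Int) = PySem.Str.len s := by
    rw [PySem.Str.len_eq]
    simp [PySem.Chars.lower]
  rw [this]
  exact List.mem_map_of_mem hs

-- the indexed lengths are all nonnegative (they are Python string lengths)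
theorem pvLengths_nonneg (stems : List String) :
    ∀ L ∈ PySem.List.sorted (PySem.Set.ofList (stems.map PySem.Str.len)) (fun x => x) false,
      0 ≤ L := by
  intro L hL
  rw [PySem.List.mem_sorted, PySem.Set.mem_ofList] at hL
  rcases List.mem_map.mp hL with ⟨s, _, rfl⟩
  rw [PySem.Str.len_eq]
  exact Int.natCast_nonneg _

-- B's per-stem count is the plain containment count over neutrals
theorem count_windowSets (neutrals stems : List String) (s : String) (hs : s ∈ stems) :
    ((neutrals.map (fun text => pvWindowSet (PySem.Chars.lower text.toList)
        (PySem.List.sorted (PySem.Set.ofList (stems.map PySem.Str.len)) (fun x => x) false))).countP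
      (fun ws => PySem.Set.contains ws (String.ofList (PySem.Chars.lower s.toList))))
    = neutrals.countP (fun text => PySem.Str.isIn (PySem.Str.lower s) (PySem.Str.lower text)) := by
  rw [List.countP_map]
  apply List.countP_congr
  intro text _
  simp only [Function.comp]
  constructor
  · intro h
    have := (contains_windowSet_iff (PySem.Chars.lower text.toList) (PySem.Chars.lower s.toList)
      _ (lower_len_mem_lengths stems s hs) (pvLengths_nonneg stems)).mp h
    rw [PySem.Str.isIn_iff_infix]
    simpa [PySem.Str.toList_lower] using this
  · intro h
    apply (contains_windowSet_iff (PySem.Chars.lower text.toList) (PySem.Chars.lower s.toList)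
      _ (lower_len_mem_lengths stems s hs) (pvLengths_nonneg stems)).mpr
    have := PySem.Str.isIn_iff_infix (PySem.Str.lower s) (PySem.Str.lower text) |>.mp h
    simpa [PySem.Str.toList_lower] using this

-- a fold of key-determined inserts does not change the value at a key not in the list
theorem getD_foldl_insert_of_not_mem (f : String → Int) (k : String) :
    ∀ (l : List String) (d : PySem.Dict String Int), k ∉ l →
      (l.foldl (fun d s => d.insert s (f s)) d).getD k 0 = d.getD k 0 := by
  intro l
  induction l with
  | nil => intro d _; rfl
  | cons s rest ih =>
    intro d hk
    simp only [List.foldl_cons]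
    rw [ih _ (by simp_all), PySem.Dict.getD_insert_of_ne _ _ _ (by simp_all)]

-- and sets it to f k at every key of the list
theorem getD_foldl_insert_self (f : String → Int) (k : String) :
    ∀ (l : List String) (d : PySem.Dict String Int), k ∈ l →
      (l.foldl (fun d s => d.insert s (f s)) d).getD k 0 = f k := by
  intro l
  induction l with
  | nil => intro _ h; cases h
  | cons s rest ih =>
    intro d hk
    simp only [List.foldl_cons]
    by_cases hr : k ∈ rest
    · exact ih _ hr
    · have hks : k = s := by rcases List.mem_cons.mp hk with h | h; exact h; exact absurd h hr
      subst hks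
      rw [getD_foldl_insert_of_not_mem f k rest _ hr, PySem.Dict.getD_insert_self]

-- A's capped inner loop, for a positive cap: running count clipped at mx
theorem aHits_pos (sl : String) (mx : Int) :
    ∀ (ts : List String) (hits : Int), hits < mx →
      pvAHits sl mx ts hits
        = min (hits + (ts.countP (fun t => PySem.Str.isIn sl (PySem.Str.lower t)) : Nat)) mx := by
  intro ts
  induction ts with
  | nil => intro hits h; simp [pvAHits]; omega
  | cons t ts ih =>
    intro hits h
    simp only [pvAHits, List.countP_cons]
    by_cases hp : PySem.Str.isIn sl (PySem.Str.lower t) = true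
    · simp only [hp, if_true]
      by_cases hge : hits + 1 ≥ mx
      · have hcnt : (0:Int) ≤ (ts.countP (fun t => PySem.Str.isIn sl (PySem.Str.lower t)) : Nat) :=
          Int.natCast_nonneg _
        simp only [hge, if_true]
        push_cast
        omega
      · simp only [hge, if_false]
        rw [ih _ (by omega)]
        push_cast
        ring_nf
    · simp only [hp]
      rw [ih _ h]
      simp

-- A's capped inner loop, for a nonpositive cap: the first hit breaks at 1
theorem aHits_nonpos (sl : String) (mx : Int) (hmx : mx ≤ 0) :
    ∀ (ts : List String),
      pvAHits sl mx ts 0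
        = min ((ts.countP (fun t => PySem.Str.isIn sl (PySem.Str.lower t)) : Nat) : Int) 1 := by
  intro ts
  induction ts with
  | nil => simp [pvAHits]
  | cons t ts ih =>
    simp only [pvAHits, List.countP_cons]
    by_cases hp : PySem.Str.isIn sl (PySem.Str.lower t) = true
    · have hcnt : (0:Int) ≤ (ts.countP (fun t => PySem.Str.isIn sl (PySem.Str.lower t)) : Nat) :=
        Int.natCast_nonneg _
      have : ((0:Int) + 1 ≥ mx) = True := by simp; omega
      simp only [hp, if_true, this, if_true]
      push_cast
      omega
    · simp only [hp, ih]
      simp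

theorem benign_keys (stems : List String) (f : String → Int) :
    ((stems.foldl (fun d s => d.insert s (f s))
        (stems.foldl (fun d s => d.insert s 0) PySem.Dict.empty)).keys)
      = PySem.Set.ofList stems := by
  rw [PySem.Dict.keys_foldl_insert, PySem.Dict.keys_foldl_insert]
  simp only [PySem.Dict.keys_empty]
  rw [PySem.Set.update_nil_left]
  rw [PySem.Set.update_eq_append_filter]
  have : ((PySem.Set.ofList stems).filter
      (fun y => !(PySem.Set.contains (PySem.Set.ofList stems) y))) = [] := by
    rw [List.filter_eq_nil_iff]
    intro y hy
    simp
    exact (PySem.Set.mem_ofList _ _).mp hy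
  rw [this, List.append_nil]

theorem nodup_benign_keys (stems : List String) (f : String → Int) :
    ((stems.foldl (fun d s => d.insert s (f s))
        (stems.foldl (fun d s => d.insert s 0) PySem.Dict.empty)).keys).Nodup := by
  apply PySem.Dict.nodup_keys_foldl_insert
  apply PySem.Dict.nodup_keys_foldl_insert
  exact PySem.Dict.nodup_keys_empty

-- A's items list, as a map over the deduplicated stems
theorem benign_items (neutrals stems : List String) (mx : Int) :
    benign_counts_by_stem neutrals stems mx
      = (PySem.List.dedup stems).map
          (fun s => (s, pvAHits (PySem.Str.lower s) mx neutrals 0)) := by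
  unfold benign_counts_by_stem
  simp only []
  set f : String → Int := fun s => pvAHits (PySem.Str.lower s) mx neutrals 0 with hf
  have hfold :
      (stems.foldl (fun d s =>
          let s_low := PySem.Str.lower s
          let hits := pvAHits s_low mx neutrals 0
          d.insert s hits)
        (stems.foldl (fun d s => d.insert s 0) PySem.Dict.empty))
      = (stems.foldl (fun d s => d.insert s (f s))
        (stems.foldl (fun d s => d.insert s 0) PySem.Dict.empty)) := rfl
  rw [hfold]
  rw [PySem.Dict.items_eq_map_keys _ (nodup_benign_keys stems f) 0]
  rw [benign_keys stems f]
  rw [← PySem.List.dedup_eq_ofList]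
  apply List.map_congr_left
  intro s hs
  have hmem : s ∈ stems := (PySem.List.mem_dedup _ _).mp hs
  rw [getD_foldl_insert_self f s stems _ hmem]

-- ===== VERDICT (by name: the statements are the Claim_ definitions above) =====
theorem benign_counts_by_stem_spec : Claim_unchanged_benign_counts_by_stem := by
  intro neutrals stems mx _ hnd
  unfold benign_counts_by_stem_alt
  rw [benign_items]
  simp only []
  apply List.map_congr_left
  intro s hs
  have hmem : s ∈ stems := (PySem.List.mem_dedup _ _).mp hs
  rw [count_windowSets neutrals stems s hmem]
  by_cases hmx : 1 ≤ mx
  · rw [aHits_pos (PySem.Str.lower s) mx neutrals 0 (by omega)]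
    congr 1
    omega
  · -- mx ≤ 0: since ¬ D_, no stem occurs anywhere, so the count is 0 and both sides are 0
    have hc0 : neutrals.countP
        (fun t => PySem.Str.isIn (PySem.Str.lower s) (PySem.Str.lower t)) = 0 := by
      rw [List.countP_eq_zero]
      intro t ht hit
      exact hnd ⟨by omega, s, hmem, t, ht, hit⟩
    rw [aHits_nonpos (PySem.Str.lower s) mx (by omega), hc0]
    congr 1
    omega

theorem benign_counts_by_stem_changed : Claim_changed_benign_counts_by_stem := by
  unfold Claim_changed_benign_counts_by_stem; decide

theorem benign_counts_by_stem_tight : Claim_exact_benign_counts_by_stem := by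
  intro neutrals stems mx _ hd heq
  rcases hd with ⟨hmx, s, hs, t, ht, hit⟩
  unfold benign_counts_by_stem_alt at heq
  rw [benign_items] at heq
  simp only [] at heq
  have hsd : s ∈ PySem.List.dedup stems := (PySem.List.mem_dedup _ _).mpr hs
  have := List.map_inj_left.mp heq s hsd
  have hval := congrArg Prod.snd this
  simp only [] at hval
  rw [count_windowSets neutrals stems s hs] at hval
  set c : Nat := neutrals.countP (fun u => PySem.Str.isIn (PySem.Str.lower s) (PySem.Str.lower u))
    with hc
  have hcpos : 0 < c := List.countP_pos_iff.mpr ⟨t, ht, hit⟩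
  rw [aHits_nonpos (PySem.Str.lower s) mx hmx] at hval
  have h1 : min ((c : Nat) : Int) 1 = 1 := by omega
  have h2 : max 0 (min ((c : Nat) : Int) mx) = 0 := by omega
  rw [h1, h2] at hval
  exact absurd hval (by norm_num)
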